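-- pv_equiv track=rewrite | github.com/yaolsenarch/SDoH-LLMClassification | src/llm_utils.py | calculate_disagreement_score
-- ===== SOURCE A (Python) =====
-- def calculate_disagreement_score(gold_labels, predicted_labels, categories):
--     """
--     Calculate how many categories the model got wrong.
--
--     Args:
--         gold_labels: List like ["smoking", "alcohol"]
--         predicted_labels: List like ["smoking", "employment"]
--         categories: All 10 categories
--
--     Returns:
--         disagreement_score: Number of wrong categories (0 to 10)
--         per_category_errors: Dict showing which categories were wrong
--     """
--     # Convert to binary vectors for comparison
--     gold_vec = [1 if cat in gold_labels else 0 for cat in categories]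
--     pred_vec = [1 if cat in predicted_labels else 0 for cat in categories]
--
--     # Count disagreements
--     disagreement_score = sum(g != p for g, p in zip(gold_vec, pred_vec))
--
--     # Track which categories had errors
--     per_category_errors = {}
--     for i, cat in enumerate(categories):
--         if gold_vec[i] != pred_vec[i]:
--             if gold_vec[i] == 1 and pred_vec[i] == 0:
--                 per_category_errors[cat] = "FN (missed)"
--             else:
--                 per_category_errors[cat] = "FP (false alarm)"
--
--     return disagreement_score, per_category_errors
-- ===== SOURCE B (Python) =====
-- def calculate_disagreement_score(gold_labels, predicted_labels, categories):
--     """Precompute the two set differences (FN = gold-only, FP = pred-only) once,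
--     then classify each category by a single set-membership test -- no binary
--     vectors and no per-category scans of the label lists."""
--     gold_set = set(gold_labels)
--     pred_set = set(predicted_labels)
--     fn = gold_set - pred_set
--     fp = pred_set - gold_set
--     disagreement_score = 0
--     per_category_errors = {}
--     for cat in categories:
--         if cat in fn:
--             disagreement_score += 1
--             per_category_errors[cat] = "FN (missed)"
--         elif cat in fp:
--             disagreement_score += 1
--             per_category_errors[cat] = "FP (false alarm)"
--     return disagreement_score, per_category_errors
-- ===== Notes on version B (the rewrite author's own statement) =====
-- stated objective: faster
-- what changed: B precomputes the set differences gold-pred (FN) and pred-gold (FP) once and classifies each category with one O(1) set-membership test, instead of A's binary-vector build with two linear list scans per category plus separate sum and indexed classification passes.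
import Mathlib
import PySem

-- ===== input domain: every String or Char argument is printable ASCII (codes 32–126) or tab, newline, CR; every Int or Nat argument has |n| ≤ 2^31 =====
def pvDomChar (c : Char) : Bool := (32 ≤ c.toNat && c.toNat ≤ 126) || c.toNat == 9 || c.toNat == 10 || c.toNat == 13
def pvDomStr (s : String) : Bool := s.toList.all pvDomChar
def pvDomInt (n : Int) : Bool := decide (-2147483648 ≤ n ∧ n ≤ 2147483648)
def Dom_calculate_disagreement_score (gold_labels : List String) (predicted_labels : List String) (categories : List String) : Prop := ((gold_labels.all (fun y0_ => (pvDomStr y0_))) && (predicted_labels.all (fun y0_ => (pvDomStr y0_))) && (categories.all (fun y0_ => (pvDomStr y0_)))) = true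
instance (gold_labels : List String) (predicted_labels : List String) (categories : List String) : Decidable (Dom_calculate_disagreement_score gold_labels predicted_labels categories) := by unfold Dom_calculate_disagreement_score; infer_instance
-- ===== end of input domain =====

-- B precomputes the set differences gold−pred (FN) and pred−gold (FP) once and classifies each
-- category by one set-membership test, replacing A's binary vectors and per-category list scans
-- plus separate sum/classification passes; objective: faster (asymptotic).

-- ===== PORT A =====
def calculate_disagreement_score (gold_labels : List String) (predicted_labels : List String) (categories : List String) : Int × (List (String × String)) :=
  let gold_vec : List Int := categories.map (fun cat => if gold_labels.contains cat then 1 else 0)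
  let pred_vec : List Int := categories.map (fun cat => if predicted_labels.contains cat then 1 else 0)
  let disagreement_score : Int :=
    (gold_vec.zip pred_vec).foldl (fun acc gp => acc + (if gp.1 ≠ gp.2 then 1 else 0)) 0
  let per_category_errors : PySem.Dict String String :=
    (PySem.List.enumerate categories 0).foldl
      (fun (d : PySem.Dict String String) ic =>
        if PySem.List.pyGetD gold_vec ic.1 0 ≠ PySem.List.pyGetD pred_vec ic.1 0 then
          if PySem.List.pyGetD gold_vec ic.1 0 = 1 ∧ PySem.List.pyGetD pred_vec ic.1 0 = 0 then
            d.insert ic.2 "FN (missed)"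
          else
            d.insert ic.2 "FP (false alarm)"
        else d)
      PySem.Dict.empty
  (disagreement_score, per_category_errors.items)

-- ===== PORT B =====
def calculate_disagreement_score_alt (gold_labels : List String) (predicted_labels : List String) (categories : List String) : Int × (List (String × String)) :=
  let gold_set : PySem.Set String := PySem.Set.ofList gold_labels
  let pred_set : PySem.Set String := PySem.Set.ofList predicted_labels
  let fn : PySem.Set String := PySem.Set.diff gold_set pred_set
  let fp : PySem.Set String := PySem.Set.diff pred_set gold_set
  let r : Int × PySem.Dict String String :=
    categories.foldl
      (fun st cat =>
        if PySem.Set.contains fn cat then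
          (st.1 + 1, st.2.insert cat "FN (missed)")
        else if PySem.Set.contains fp cat then
          (st.1 + 1, st.2.insert cat "FP (false alarm)")
        else st)
      (0, PySem.Dict.empty)
  (r.1, r.2.items)

-- ===== PRECONDITION & SPEC =====
def Spec_calculate_disagreement_score (gold_labels : List String) (predicted_labels : List String) (categories : List String) (out : Int × (List (String × String))) : Prop := out = calculate_disagreement_score_alt gold_labels predicted_labels categories
instance (gold_labels : List String) (predicted_labels : List String) (categories : List String) (out : Int × (List (String × String))) : Decidable (Spec_calculate_disagreement_score gold_labels predicted_labels categories out) := by unfold Spec_calculate_disagreement_score; infer_instance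

-- ===== CLAIM (what is proved, stated in full; the proofs are below) =====
def Claim_equal_calculate_disagreement_score : Prop := ∀ (gold_labels : List String) (predicted_labels : List String) (categories : List String), Dom_calculate_disagreement_score gold_labels predicted_labels categories → Spec_calculate_disagreement_score gold_labels predicted_labels categories (calculate_disagreement_score gold_labels predicted_labels categories)

-- ===== LEMMAS AND PROOFS =====

-- folding over enumerate with a body that ignores the index = folding over the list
theorem pv_foldl_enumerate_snd {α γ : Type} (f : γ → α → γ) :
    ∀ (xs : List α) (s : Int) (init : γ),
      (PySem.List.enumerate xs s).foldl (fun a p => f a p.2) init = xs.foldl f init := by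
  intro xs
  induction xs with
  | nil => intro s init; rfl
  | cons x xs ih => intro s init; rw [PySem.List.enumerate_cons]; exact ih (s + 1) (f init x)

-- A's score loop over the zipped vectors, rephrased as a fold over categories.
theorem pv_score_eq (gl pl : List String) (cats : List String) :
    (((cats.map (fun cat => if gl.contains cat then (1:Int) else 0)).zip
      (cats.map (fun cat => if pl.contains cat then (1:Int) else 0))).foldl
        (fun acc gp => acc + (if gp.1 ≠ gp.2 then 1 else 0)) (0:Int))
    = cats.foldl (fun acc cat =>
        acc + (if (if gl.contains cat then (1:Int) else 0) ≠ (if pl.contains cat then (1:Int) else 0) then 1 else 0)) (0:Int) := by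
  rw [List.zip_map]
  rw [show cats.zip cats = cats.map (fun c => (c, c)) by
    induction cats with
    | nil => rfl
    | cons x xs ih => simp [List.zip]]
  rw [List.map_map, List.foldl_map]
  rfl

-- A's error loop over enumerate, rephrased as a fold over categories (the index only
-- selects the vector entry that the category itself determines).
theorem pv_errs_eq (gl pl : List String) (cats : List String) :
    ((PySem.List.enumerate cats 0).foldl
      (fun (d : PySem.Dict String String) ic =>
        if PySem.List.pyGetD (cats.map (fun cat => if gl.contains cat then (1:Int) else 0)) ic.1 0
            ≠ PySem.List.pyGetD (cats.map (fun cat => if pl.contains cat then (1:Int) else 0)) ic.1 0 then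
          if PySem.List.pyGetD (cats.map (fun cat => if gl.contains cat then (1:Int) else 0)) ic.1 0 = 1 ∧
             PySem.List.pyGetD (cats.map (fun cat => if pl.contains cat then (1:Int) else 0)) ic.1 0 = 0 then
            d.insert ic.2 "FN (missed)"
          else
            d.insert ic.2 "FP (false alarm)"
        else d)
      PySem.Dict.empty)
    = cats.foldl
        (fun (d : PySem.Dict String String) cat =>
          if (if gl.contains cat then (1:Int) else 0) ≠ (if pl.contains cat then (1:Int) else 0) then
            if (if gl.contains cat then (1:Int) else 0) = 1 ∧ (if pl.contains cat then (1:Int) else 0) = 0 then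
              d.insert cat "FN (missed)"
            else
              d.insert cat "FP (false alarm)"
          else d)
        PySem.Dict.empty := by
  rw [PySem.List.foldl_congr_mem (g := fun (d : PySem.Dict String String) (ic : Int × String) =>
        if (if gl.contains ic.2 then (1:Int) else 0) ≠ (if pl.contains ic.2 then (1:Int) else 0) then
          if (if gl.contains ic.2 then (1:Int) else 0) = 1 ∧ (if pl.contains ic.2 then (1:Int) else 0) = 0 then
            d.insert ic.2 "FN (missed)"
          else
            d.insert ic.2 "FP (false alarm)"
        else d)]
  · exact pv_foldl_enumerate_snd
      (fun (d : PySem.Dict String String) cat =>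
        if (if gl.contains cat then (1:Int) else 0) ≠ (if pl.contains cat then (1:Int) else 0) then
          if (if gl.contains cat then (1:Int) else 0) = 1 ∧ (if pl.contains cat then (1:Int) else 0) = 0 then
            d.insert cat "FN (missed)"
          else
            d.insert cat "FP (false alarm)"
        else d)
      cats 0 PySem.Dict.empty
  · intro acc x hx
    rcases (PySem.List.mem_enumerate_iff _ _ _).1 hx with ⟨k, hk, rfl⟩
    simp [PySem.List.pyGetD_natCast, List.getD, List.getElem?_map, List.getElem?_eq_getElem hk]

-- membership in the precomputed set difference, as a Boolean fact about the input lists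
theorem pv_contains_diff (xs ys : List String) (c : String) :
    PySem.Set.contains (PySem.Set.diff (PySem.Set.ofList xs) (PySem.Set.ofList ys)) c
      = (xs.contains c && !ys.contains c) := by
  by_cases hx : c ∈ xs <;> by_cases hy : c ∈ ys <;>
    simp [PySem.Set.contains_eq_listContains, PySem.Set.mem_diff, PySem.Set.mem_ofList, hx, hy]

-- B's single fold over categories splits into the two canonical component folds.
theorem pv_fuseB (gl pl : List String) (cats : List String)
    (s : Int) (d : PySem.Dict String String) :
    cats.foldl
      (fun (st : Int × PySem.Dict String String) cat =>
        if PySem.Set.contains (PySem.Set.diff (PySem.Set.ofList gl) (PySem.Set.ofList pl)) cat then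
          (st.1 + 1, st.2.insert cat "FN (missed)")
        else if PySem.Set.contains (PySem.Set.diff (PySem.Set.ofList pl) (PySem.Set.ofList gl)) cat then
          (st.1 + 1, st.2.insert cat "FP (false alarm)")
        else st)
      (s, d)
    = (cats.foldl (fun acc cat =>
          acc + (if (if gl.contains cat then (1:Int) else 0) ≠ (if pl.contains cat then (1:Int) else 0) then 1 else 0)) s,
       cats.foldl
        (fun (d : PySem.Dict String String) cat =>
          if (if gl.contains cat then (1:Int) else 0) ≠ (if pl.contains cat then (1:Int) else 0) then
            if (if gl.contains cat then (1:Int) else 0) = 1 ∧ (if pl.contains cat then (1:Int) else 0) = 0 then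
              d.insert cat "FN (missed)"
            else
              d.insert cat "FP (false alarm)"
          else d)
        d) := by
  induction cats generalizing s d with
  | nil => rfl
  | cons c cs ih =>
    simp only [List.foldl_cons, pv_contains_diff]
    cases hgb : gl.contains c <;> cases hpb : pl.contains c
    · simpa using ih s d
    · simpa using ih (s + 1) (d.insert c "FP (false alarm)")
    · simpa using ih (s + 1) (d.insert c "FN (missed)")
    · simpa using ih s d

-- ===== VERDICT (by name: the statement is the Claim_ definition above) =====
theorem calculate_disagreement_score_spec : Claim_equal_calculate_disagreement_score := by
  intro gl pl cats _
  show _ = _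
  simp only [calculate_disagreement_score, calculate_disagreement_score_alt]
  rw [pv_score_eq, pv_errs_eq, pv_fuseB]
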